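-- pv_equiv track=rewrite | github.com/psanch/coen140 | Classifying:Clustering_ForestCoverType_Project/covtype_clustering_error.py | getClusterToLabelMapping
-- ===== SOURCE A (Python) =====
-- def getClusterToLabelMapping(cxl,n):
--
-- 	hi, hiIndex = 0,0
-- 	label_mappings = [[],[],[],[],[],[],[]]
--
-- 	for i in range(n):
-- 		hi = cxl[i][0]
-- 		for j in range(1,n):
-- 			if(hi < cxl[i][j]):
-- 				hi = cxl[i][j]
-- 		for j in range(n):
-- 			if( hi == cxl[i][j] ):
-- 				label_mappings[i].append(j)
--
-- 	return label_mappings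
-- ===== SOURCE B (Python) =====
-- def getClusterToLabelMapping(cxl, n):
--     out = []
--     for i in range(7):
--         cols = []
--         if i < n:
--             row = cxl[i]
--             hi = row[0]
--             for j in range(n):
--                 v = row[j]
--                 if v > hi:
--                     hi = v
--                     cols = [j]
--                 elif v == hi:
--                     cols.append(j)
--         out.append(cols)
--     return out
-- ===== Notes on version B (the rewrite author's own statement) =====
-- stated objective: simpler
-- what changed: B replaces A's two sequential scans per row (one to find the max, one to collect its columns) by a single scan that keeps the running max and resets/extends the column list, and builds the 7-slot result by mapping over the slots instead of mutating a preallocated list of lists.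
import Mathlib
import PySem

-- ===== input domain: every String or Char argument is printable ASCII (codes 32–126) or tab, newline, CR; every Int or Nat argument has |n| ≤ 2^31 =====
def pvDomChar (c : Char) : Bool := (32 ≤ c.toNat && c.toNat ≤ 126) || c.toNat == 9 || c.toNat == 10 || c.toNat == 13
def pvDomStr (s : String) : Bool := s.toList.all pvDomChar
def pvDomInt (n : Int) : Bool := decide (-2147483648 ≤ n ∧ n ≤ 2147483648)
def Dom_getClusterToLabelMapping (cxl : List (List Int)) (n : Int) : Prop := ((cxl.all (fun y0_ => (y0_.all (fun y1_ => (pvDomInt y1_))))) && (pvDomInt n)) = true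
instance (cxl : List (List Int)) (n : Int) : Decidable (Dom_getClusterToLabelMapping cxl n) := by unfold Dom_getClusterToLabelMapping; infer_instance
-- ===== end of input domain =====

-- B merges A's two per-row scans (max, then collect argmax columns) into one scan with a
-- running max and reset-or-extend column list, and builds the 7-slot result as a map over
-- the slots instead of mutating a preallocated list; objective: simpler, same cost.


-- ===== PORT A =====
def getClusterToLabelMapping (cxl : List (List Int)) (n : Int) : List (List Int) :=
  (PySem.List.pyRange 0 n 1).foldl (fun lm i =>
    let row := (PySem.List.pyGet? cxl i).getD []
    let hi := (PySem.List.pyRange 1 n 1).foldl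
      (fun hi j => if hi < (PySem.List.pyGet? row j).getD 0
                   then (PySem.List.pyGet? row j).getD 0 else hi)
      ((PySem.List.pyGet? row 0).getD 0)
    (PySem.List.pyRange 0 n 1).foldl
      (fun lm j => if hi = (PySem.List.pyGet? row j).getD 0
        then lm.set i.toNat (((PySem.List.pyGet? lm i).getD []) ++ [j]) else lm)
      lm)
  [[], [], [], [], [], [], []]

-- ===== PORT B =====
def getClusterToLabelMapping_alt (cxl : List (List Int)) (n : Int) : List (List Int) :=
  (List.range 7).map (fun (i : Nat) =>
    if (i : Int) < n then
      let row := (PySem.List.pyGet? cxl (i : Int)).getD []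
      ((PySem.List.pyRange 0 n 1).foldl
        (fun (st : Int × List Int) j =>
          let v := (PySem.List.pyGet? row j).getD 0
          if st.1 < v then (v, [j])
          else if v = st.1 then (st.1, st.2 ++ [j])
          else st)
        ((PySem.List.pyGet? row 0).getD 0, ([] : List Int))).2
    else [])

-- ===== PRECONDITION & SPEC =====
-- Pre_ excludes exactly the inputs where Python A raises IndexError: a positive n larger
-- than 7 (the fixed slot list), larger than len(cxl), or larger than some of the first n rows.
def Pre_getClusterToLabelMapping (cxl : List (List Int)) (n : Int) : Prop :=
  0 < n → (n ≤ 7 ∧ n ≤ cxl.length ∧ ∀ row ∈ cxl.take n.toNat, n ≤ row.length)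
instance (cxl : List (List Int)) (n : Int) : Decidable (Pre_getClusterToLabelMapping cxl n) := by
  unfold Pre_getClusterToLabelMapping; infer_instance

def pvWitness_getClusterToLabelMapping : List (List Int) × Int := ([[1, 2], [2, 1]], 2)

def Spec_getClusterToLabelMapping (cxl : List (List Int)) (n : Int) (out : List (List Int)) : Prop := out = getClusterToLabelMapping_alt cxl n
instance (cxl : List (List Int)) (n : Int) (out : List (List Int)) : Decidable (Spec_getClusterToLabelMapping cxl n out) := by unfold Spec_getClusterToLabelMapping; infer_instance

-- ===== CLAIM (what is proved, stated in full; the proofs are below) =====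
def Claim_equal_getClusterToLabelMapping : Prop := ∀ (cxl : List (List Int)) (n : Int), Dom_getClusterToLabelMapping cxl n → Pre_getClusterToLabelMapping cxl n → Spec_getClusterToLabelMapping cxl n (getClusterToLabelMapping cxl n)

-- ===== LEMMAS AND PROOFS =====

-- value of row[j] as both ports read it
def pvF (row : List Int) (j : Int) : Int := (PySem.List.pyGet? row j).getD 0

-- A's first inner loop: running maximum
def pvMax (row : List Int) (js : List Int) (h0 : Int) : Int :=
  js.foldl (fun hi j => if hi < pvF row j then pvF row j else hi) h0

theorem pvMax_le (row : List Int) (js : List Int) (h0 : Int) : h0 ≤ pvMax row js h0 := by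
  induction js generalizing h0 with
  | nil => simp [pvMax]
  | cons j js ih =>
    have hstep : pvMax row (j :: js) h0
        = pvMax row js (if h0 < pvF row j then pvF row j else h0) := by
      simp [pvMax]
    by_cases h1 : h0 < pvF row j
    · rw [hstep, if_pos h1]; exact le_trans (le_of_lt h1) (ih _)
    · rw [hstep, if_neg h1]; exact ih _

-- B's single pass computes (max, columns achieving the max, in order)
theorem pass1 (row : List Int) (js : List Int) (h0 : Int) (c0 : List Int) :
    js.foldl (fun (st : Int × List Int) j =>
        if st.1 < pvF row j then (pvF row j, [j])
        else if pvF row j = st.1 then (st.1, st.2 ++ [j])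
        else st) (h0, c0)
    = (pvMax row js h0,
       (if h0 = pvMax row js h0 then c0 else [])
         ++ js.filter (fun j => pvF row j = pvMax row js h0)) := by
  induction js generalizing h0 c0 with
  | nil => simp [pvMax]
  | cons j js ih =>
    have hM : pvMax row (j :: js) h0 = pvMax row js (if h0 < pvF row j then pvF row j else h0) := by
      simp [pvMax]
    rw [List.foldl_cons, hM, List.filter_cons]
    simp only [decide_eq_true_eq]
    by_cases h1 : h0 < pvF row j
    · rw [if_pos h1, if_pos h1, ih]
      have hle := pvMax_le row js (pvF row j)
      have hne : ¬ h0 = pvMax row js (pvF row j) := by omega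
      rw [if_neg hne]
      by_cases h2 : pvF row j = pvMax row js (pvF row j)
      · rw [if_pos h2, if_pos h2]; simp
      · rw [if_neg h2, if_neg h2]
    · rw [if_neg h1, if_neg h1]
      have hle := pvMax_le row js h0
      by_cases h2 : pvF row j = h0
      · rw [if_pos h2, ih]
        by_cases h3 : h0 = pvMax row js h0
        · rw [if_pos h3, if_pos h3, if_pos (h2.trans h3)]; simp
        · rw [if_neg h3, if_neg h3, if_neg (fun h => h3 (h2.symm.trans h))]
      · rw [if_neg h2, ih]
        have hne : ¬ pvF row j = pvMax row js h0 := by omega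
        rw [if_neg hne]

-- A's second inner loop: appending into slot t collects a filter
theorem setloop (t : Nat) (P : Int → Prop) [DecidablePred P] (js : List Int) :
    ∀ (lm : List (List Int)), t < lm.length →
    js.foldl (fun lm j => if P j
        then lm.set t (((PySem.List.pyGet? lm (t : Int)).getD []) ++ [j]) else lm) lm
    = lm.set t (((PySem.List.pyGet? lm (t : Int)).getD []) ++ js.filter (fun j => P j)) := by
  induction js with
  | nil =>
    intro lm ht
    simp [PySem.List.pyGet?_natCast, List.getElem?_eq_getElem ht, List.set_getElem_self]
  | cons j js ih =>
    intro lm ht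
    by_cases hp : P j
    · rw [List.foldl_cons, if_pos hp,
        ih (lm.set t (((PySem.List.pyGet? lm (t : Int)).getD []) ++ [j])) (by simpa using ht)]
      simp [List.set_set, ht, hp]
    · rw [List.foldl_cons, if_neg hp, ih lm ht]
      simp [hp]

-- the outer loop over the rows, abstractly
theorem outerA (G : List (List Int) → Int → List (List Int)) (g : Nat → List Int)
    (hG : ∀ (lm : List (List Int)) (k : Nat), k < lm.length →
      G lm (k : Int) = lm.set k (lm.getD k [] ++ g k)) :
    ∀ (m : Nat) (L : List (List Int)), m ≤ L.length →
    List.foldl (fun lm (k : Nat) => G lm (k : Int)) L (List.range m)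
    = (List.range L.length).map
        (fun k => if k < m then L.getD k [] ++ g k else L.getD k []) := by
  intro m
  induction m with
  | zero =>
    intro L _
    simp only [List.range_zero, List.foldl_nil]
    apply List.ext_getElem?
    intro k
    by_cases hk : k < L.length
    · simp [hk, List.getD]
    · rw [List.getElem?_eq_none (by omega)]
      simp [hk]
  | succ m ih =>
    intro L hm
    rw [List.range_succ, List.foldl_append, ih L (by omega), List.foldl_cons, List.foldl_nil]
    have hlen : m < ((List.range L.length).map
        (fun k => if k < m then L.getD k [] ++ g k else L.getD k [])).length := by
      simp; omega
    rw [hG _ m hlen]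
    have hold : ((List.range L.length).map
        (fun k => if k < m then L.getD k [] ++ g k else L.getD k [])).getD m []
        = L.getD m [] := by
      simp [List.getD, show m < L.length by omega]
    rw [hold]
    apply List.ext_getElem?
    intro k
    by_cases hk : k < L.length
    · by_cases hkm : k = m
      · rw [← hkm] at hlen ⊢
        rw [List.getElem?_set_self hlen]
        simp [hk]
      · rw [List.getElem?_set_ne (by omega)]
        have hiff : (k < m) = (k < m + 1) := by
          by_cases h : k < m
          · simp [h]; omega
          · simp [h]; omega
        by_cases h2 : k < m
        · simp [hk, h2]
          intro h; exact absurd h (by omega)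
        · have h3 : ¬ k < m + 1 := by omega
          simp [hk, h2]
          intro h; exact absurd h (by omega)
    · rw [List.getElem?_set_ne (by omega)]
      simp [hk]

-- helper names for the per-row quantities (proof-only)
def rowAt (cxl : List (List Int)) (i : Int) : List Int := (PySem.List.pyGet? cxl i).getD []

def hiA (cxl : List (List Int)) (n : Int) (i : Int) : Int :=
  pvMax (rowAt cxl i) (PySem.List.pyRange 1 n 1) (pvF (rowAt cxl i) 0)

def colsA (cxl : List (List Int)) (n : Int) (k : Nat) : List Int :=
  (List.map (fun (j : Nat) => (j : Int)) (List.range n.toNat)).filter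
    (fun j => hiA cxl n (k : Int) = pvF (rowAt cxl (k : Int)) j)

theorem initGetD (k : Nat) : ([[],[],[],[],[],[],[]] : List (List Int)).getD k [] = [] := by
  rcases k with _|_|_|_|_|_|_|k <;> simp [List.getD]

theorem getClusterToLabelMapping_spec : Claim_equal_getClusterToLabelMapping := by
  intro cxl n _ hpre
  unfold Spec_getClusterToLabelMapping getClusterToLabelMapping
  have hm7 : n.toNat ≤ 7 := by
    by_cases h : 0 < n
    · have := (hpre h).1; omega
    · omega
  rw [PySem.List.pyRange_zero n, List.foldl_map]
  have hG : ∀ (lm : List (List Int)) (k : Nat), k < lm.length →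
      (fun (lm : List (List Int)) (i : Int) =>
        let row := (PySem.List.pyGet? cxl i).getD []
        let hi := (PySem.List.pyRange 1 n 1).foldl
          (fun hi j => if hi < (PySem.List.pyGet? row j).getD 0
                       then (PySem.List.pyGet? row j).getD 0 else hi)
          ((PySem.List.pyGet? row 0).getD 0)
        (List.map (fun (j : Nat) => (j : Int)) (List.range n.toNat)).foldl
          (fun lm j => if hi = (PySem.List.pyGet? row j).getD 0
            then lm.set i.toNat (((PySem.List.pyGet? lm i).getD []) ++ [j]) else lm)
          lm) lm (k : Int)
      = lm.set k (lm.getD k [] ++ colsA cxl n k) := by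
    intro lm k hk
    have hs := setloop k (fun j => hiA cxl n (k : Int) = pvF (rowAt cxl (k : Int)) j)
      (List.map (fun (j : Nat) => (j : Int)) (List.range n.toNat)) lm hk
    simp only [hiA, rowAt, pvF, pvMax] at hs
    simp only [Int.toNat_natCast]
    rw [hs]
    simp [PySem.List.pyGet?_natCast, List.getD_eq_getElem?_getD, colsA, hiA, rowAt, pvF, pvMax]
  have hstep := outerA (fun (lm : List (List Int)) (i : Int) =>
        let row := (PySem.List.pyGet? cxl i).getD []
        let hi := (PySem.List.pyRange 1 n 1).foldl
          (fun hi j => if hi < (PySem.List.pyGet? row j).getD 0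
                       then (PySem.List.pyGet? row j).getD 0 else hi)
          ((PySem.List.pyGet? row 0).getD 0)
        (List.map (fun (j : Nat) => (j : Int)) (List.range n.toNat)).foldl
          (fun lm j => if hi = (PySem.List.pyGet? row j).getD 0
            then lm.set i.toNat (((PySem.List.pyGet? lm i).getD []) ++ [j]) else lm)
          lm) (colsA cxl n) hG n.toNat [[],[],[],[],[],[],[]] (by simpa using hm7)
  refine hstep.trans ?_
  unfold getClusterToLabelMapping_alt
  rw [show ([[],[],[],[],[],[],[]] : List (List Int)).length = 7 from rfl]
  apply List.map_congr_left
  intro k hk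
  simp only [List.mem_range] at hk
  rw [initGetD]
  by_cases hkn : (k : Int) < n
  · rw [if_pos (by omega : k < n.toNat), if_pos hkn]
    have h0n : (0 : Int) < n := by omega
    simp only [List.nil_append, colsA, hiA, rowAt]
    have hp := pass1 ((PySem.List.pyGet? cxl (k : Int)).getD [])
      (PySem.List.pyRange 0 n 1)
      (pvF ((PySem.List.pyGet? cxl (k : Int)).getD []) 0) []
    refine Eq.trans ?_ (congrArg Prod.snd hp).symm
    have hM : pvMax ((PySem.List.pyGet? cxl (k : Int)).getD []) (PySem.List.pyRange 0 n 1)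
        (pvF ((PySem.List.pyGet? cxl (k : Int)).getD []) 0)
      = pvMax ((PySem.List.pyGet? cxl (k : Int)).getD []) (PySem.List.pyRange 1 n 1)
        (pvF ((PySem.List.pyGet? cxl (k : Int)).getD []) 0) := by
      rw [PySem.List.pyRange_one_cons h0n]
      simp [pvMax]
    rw [← PySem.List.pyRange_zero n]
    rw [hM, ite_self, List.nil_append]
    refine List.filter_congr ?_
    intro j hj
    rw [decide_eq_decide]
    constructor <;> (intro h; omega)
  · rw [if_neg (by omega), if_neg hkn]
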